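-- pv_equiv track=rewrite | github.com/ej070961/2024-2-algorithm-study | Programmers/BinarySearch/전력망을둘로나누기/seokjun.py | solution
-- ===== SOURCE A (Python) =====
-- from collections import deque
--
-- def solution(n, wires):
--     answer = n
--
--     # BFS로 전력망의 크기를 계산하는 함수
--     def bfs(start, graph, visited):
--         queue = deque([start])
--         visited[start] = True
--         count = 1
--
--         while queue:
--             node = queue.popleft()
--
--             for neighbor in graph[node]:
--                 if not visited[neighbor]:
--                     visited[neighbor] = True
--                     queue.append(neighbor)
--                     count += 1
--
--         return count
--
--     for i in range(len(wires)):
--         # 그래프 초기화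
--         graph = [[] for _ in range(n + 1)]
--
--         # 전선 중 하나를 끊고 나머지로 그래프를 생성
--         for j in range(len(wires)):
--             if i != j:
--                 a, b = wires[j]
--                 graph[a].append(b)
--                 graph[b].append(a)
--
--         # BFS로 각 전력망의 크기 계산
--         visited = [False] * (n + 1)
--         tower1_size = bfs(1, graph, visited)
--         tower2_size = n - tower1_size
--
--         # 두 전력망의 크기 차이를 계산하여 최소값을 업데이트
--         diff = abs(tower1_size - tower2_size)
--         answer = min(answer, diff)
--
--     return answer
-- ===== SOURCE B (Python) =====
-- def solution(n, wires):
--     # Edge-list saturation (Bellman-Ford style): no adjacency lists and no queue.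
--     # For each cut, sweep the wire list repeatedly, propagating reachability from
--     # tower 1, until a full sweep changes nothing; the reachable count gives the split.
--     best = n
--     for cut in range(len(wires)):
--         reach = [False] * (n + 1)
--         reach[1] = True
--         size = 1
--         changed = True
--         while changed:
--             changed = False
--             for k, (a, b) in enumerate(wires):
--                 if k != cut:
--                     if reach[a] and not reach[b]:
--                         reach[b] = True
--                         size += 1
--                         changed = True
--                     elif reach[b] and not reach[a]:
--                         reach[a] = True
--                         size += 1
--                         changed = True
--         best = min(best, abs(2 * size - n))
--     return best
-- ===== Notes on version B (the rewrite author's own statement) =====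
-- stated objective: alternative
-- what changed: B replaces A's per-cut adjacency-list rebuild plus BFS with a deque entirely: it never builds an adjacency list or a queue, instead sweeping the raw wire list repeatedly (Bellman-Ford-style label saturation) propagating reachability from tower 1 until a sweep changes nothing.
import Mathlib
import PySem

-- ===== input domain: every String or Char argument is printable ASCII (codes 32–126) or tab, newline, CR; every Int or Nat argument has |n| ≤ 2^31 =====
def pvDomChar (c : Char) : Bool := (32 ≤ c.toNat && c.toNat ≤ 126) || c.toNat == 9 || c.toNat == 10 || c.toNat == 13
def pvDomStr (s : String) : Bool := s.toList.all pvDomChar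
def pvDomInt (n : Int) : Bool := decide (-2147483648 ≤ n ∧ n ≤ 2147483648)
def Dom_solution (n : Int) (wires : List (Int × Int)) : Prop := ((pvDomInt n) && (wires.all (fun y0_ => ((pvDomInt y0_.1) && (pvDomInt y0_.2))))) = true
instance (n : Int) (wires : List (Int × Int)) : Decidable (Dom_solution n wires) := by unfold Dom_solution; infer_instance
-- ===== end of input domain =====

-- B replaces A's per-cut adjacency-list rebuild + BFS queue with queue-free edge-list
-- saturation sweeps (Bellman-Ford style); return values are proved equal on Pre_.

-- shared rendering of the Python statement `lst[i].append(v)` (index may be negative, Python-style)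
def pyAppendAt {α : Type} (g : List (List α)) (i : Int) (v : α) : List (List α) :=
  PySem.List.pySetD g i (PySem.List.pyGetD g i [] ++ [v])

-- ===== PORT A =====
-- graph rebuild for cut i: `for j in range(len(wires)): if i != j: graph[a].append(b); graph[b].append(a)`
def buildGraphA (n : Int) (wires : List (Int × Int)) (i : Int) : List (List Int) :=
  (PySem.List.enumerate wires 0).foldl
    (fun g jab => if jab.1 ≠ i then pyAppendAt (pyAppendAt g jab.2.1 jab.2.2) jab.2.2 jab.2.1 else g)
    (List.replicate (n + 1).toNat [])

-- body of A's `for neighbor in graph[node]` over the BFS state (visited, queue, count)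
def stepA (s : List Bool × List Int × Int) (nb : Int) : List Bool × List Int × Int :=
  if PySem.List.pyGetD s.1 nb true = false then
    (PySem.List.pySetD s.1 nb true, s.2.1 ++ [nb], s.2.2 + 1)
  else s

-- A's BFS while-loop; the fuel only makes the recursion total (n+3 always outlasts the queue)
def bfsA (fuel : Nat) (g : List (List Int)) (visited : List Bool) (queue : List Int) (count : Int) : Int :=
  match fuel, queue with
  | 0, _ => count
  | _ + 1, [] => count
  | fuel + 1, node :: rest =>
      let s := (PySem.List.pyGetD g node []).foldl stepA (visited, rest, count)
      bfsA fuel g s.1 s.2.1 s.2.2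

def solution (n : Int) (wires : List (Int × Int)) : Int :=
  (PySem.List.pyRange 0 (PySem.List.len wires) 1).foldl
    (fun answer i =>
      let graph := buildGraphA n wires i
      let visited := PySem.List.pySetD (List.replicate (n + 1).toNat false) 1 true
      let tower1 := bfsA (n + 3).toNat graph visited [1] 1
      let tower2 := n - tower1
      min answer |tower1 - tower2|)
    n

-- ===== PORT B =====
-- body of B's `for k, (a, b) in enumerate(wires)` over the sweep state (reach, size, changed)
def stepSat (cut : Int) (s : List Bool × Int × Bool) (kp : Int × (Int × Int)) : List Bool × Int × Bool :=
  if kp.1 ≠ cut then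
    if PySem.List.pyGetD s.1 kp.2.1 false = true ∧ PySem.List.pyGetD s.1 kp.2.2 false = false then
      (PySem.List.pySetD s.1 kp.2.2 true, s.2.1 + 1, true)
    else if PySem.List.pyGetD s.1 kp.2.2 false = true ∧ PySem.List.pyGetD s.1 kp.2.1 false = false then
      (PySem.List.pySetD s.1 kp.2.1 true, s.2.1 + 1, true)
    else s
  else s

-- one full sweep of the wire list (`changed = False; for k, (a, b) in enumerate(wires): …`)
def passB (cut : Int) (wires : List (Int × Int)) (st : List Bool × Int × Bool) : List Bool × Int × Bool :=
  (PySem.List.enumerate wires 0).foldl (stepSat cut) st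

-- B's `while changed:` loop; fuel only makes it total (each continued sweep grows `size ≤ n+1`)
def loopB (fuel : Nat) (cut : Int) (wires : List (Int × Int)) (reach : List Bool) (size : Int) : Int :=
  match fuel with
  | 0 => size
  | fuel + 1 =>
      let s := passB cut wires (reach, size, false)
      if s.2.2 = true then loopB fuel cut wires s.1 s.2.1 else s.2.1

def solution_alt (n : Int) (wires : List (Int × Int)) : Int :=
  (PySem.List.pyRange 0 (PySem.List.len wires) 1).foldl
    (fun best cut =>
      let reach := PySem.List.pySetD (List.replicate (n + 1).toNat false) 1 true
      let size := loopB (n + 3).toNat cut wires reach 1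
      min best |2 * size - n|)
    n

-- ===== PRECONDITION & SPEC =====
-- Pre_ excludes exactly the inputs on which A raises IndexError: a nonempty wire list with n < 1,
-- or (when there are at least two wires, so every wire is indexed on some iteration) a wire endpoint
-- outside Python's index range [-(n+1), n] of the node array.
def Pre_solution (n : Int) (wires : List (Int × Int)) : Prop :=
  (wires ≠ [] → 1 ≤ n) ∧
  (2 ≤ wires.length → ∀ p ∈ wires, -(n + 1) ≤ p.1 ∧ p.1 ≤ n ∧ -(n + 1) ≤ p.2 ∧ p.2 ≤ n)
instance (n : Int) (wires : List (Int × Int)) : Decidable (Pre_solution n wires) := by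
  unfold Pre_solution; infer_instance

def pvWitness_solution : Int × (List (Int × Int)) := (4, [(1, 2), (2, 3), (3, 4)])

def Spec_solution (n : Int) (wires : List (Int × Int)) (out : Int) : Prop := out = solution_alt n wires
instance (n : Int) (wires : List (Int × Int)) (out : Int) : Decidable (Spec_solution n wires out) := by
  unfold Spec_solution; infer_instance

-- ===== CLAIM (what is proved, stated in full; the proofs are below) =====
def Claim_equal_solution : Prop := ∀ (n : Int) (wires : List (Int × Int)),
  Dom_solution n wires → Pre_solution n wires → Spec_solution n wires (solution n wires)

-- ===== LEMMAS AND PROOFS =====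

-- slot k of the node array holds `true`
def Vtrue (V : List Bool) (k : Nat) : Prop := V.getD k false = true

-- the surviving wires as a symmetric relation on array slots (Python's wraparound via pyIdx?)
def EdgeE (N : Nat) (cut : Int) (wires : List (Int × Int)) (s t : Nat) : Prop :=
  ∃ q ∈ PySem.List.enumerate wires 0, q.1 ≠ cut ∧
    ((PySem.List.pyIdx? N q.2.1 = some s ∧ PySem.List.pyIdx? N q.2.2 = some t) ∨
     (PySem.List.pyIdx? N q.2.2 = some s ∧ PySem.List.pyIdx? N q.2.1 = some t))

-- slots connected to tower 1 after the cut
def ReachN (N : Nat) (cut : Int) (wires : List (Int × Int)) (k : Nat) : Prop :=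
  Relation.ReflTransGen (EdgeE N cut wires) 1 k

theorem EdgeE_symm {N : Nat} {cut : Int} {wires : List (Int × Int)} {s t : Nat}
    (h : EdgeE N cut wires s t) : EdgeE N cut wires t s := by
  obtain ⟨q, hq, hc, hd⟩ := h
  exact ⟨q, hq, hc, hd.elim (fun h => Or.inr ⟨h.2, h.1⟩) (fun h => Or.inl ⟨h.2, h.1⟩)⟩

theorem closure_sub {N : Nat} {cut : Int} {wires : List (Int × Int)} {R : List Bool}
    (h1 : Vtrue R 1) (hcl : ∀ s t, Vtrue R s → EdgeE N cut wires s t → Vtrue R t) :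
    ∀ k, ReachN N cut wires k → Vtrue R k := by
  intro k h
  induction h with
  | refl => exact h1
  | tail _ e ih => exact hcl _ _ ih e

theorem pyIdx_lt (n : Nat) (i : Int) (k : Nat) (h : PySem.List.pyIdx? n i = some k) : k < n := by
  unfold PySem.List.pyIdx? at h; split_ifs at h <;> simp_all <;> omega

theorem pyIdx_of_range (N : Nat) (a : Int) (h1 : -(N : Int) ≤ a) (h2 : a < (N : Int)) :
    ∃ k, PySem.List.pyIdx? N a = some k := by
  unfold PySem.List.pyIdx?
  split_ifs <;> exact ⟨_, rfl⟩

theorem pyGetD_idx {α : Type} (V : List α) (a : Int) (k : Nat) (d : α)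
    (h : PySem.List.pyIdx? V.length a = some k) : PySem.List.pyGetD V a d = V.getD k d := by
  simp [PySem.List.pyGetD, PySem.List.pyGet?, h, List.getD_eq_getElem?_getD]

theorem pySetD_idx {α : Type} (V : List α) (a : Int) (k : Nat) (v : α)
    (h : PySem.List.pyIdx? V.length a = some k) : PySem.List.pySetD V a v = V.set k v := by
  simp [PySem.List.pySetD, PySem.List.pySet?, h]

theorem getD_set_self {α : Type} (V : List α) (k : Nat) (v d : α) (h : k < V.length) :
    (V.set k v).getD k d = v := by
  simp [List.getD_eq_getElem?_getD, h]

theorem getD_set_ne {α : Type} (V : List α) (k s : Nat) (v d : α) (h : s ≠ k) :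
    (V.set k v).getD s d = V.getD s d := by
  simp [List.getD_eq_getElem?_getD, List.getElem?_set_ne (Ne.symm h)]

theorem count_set_true (V : List Bool) (k : Nat) (h : k < V.length) (hf : V.getD k false = false) :
    (V.set k true).count true = V.count true + 1 := by
  induction V generalizing k with
  | nil => simp at h
  | cons x xs ih =>
      cases k with
      | zero => simp_all
      | succ k =>
          simp only [List.set_cons_succ, List.count_cons]
          rw [ih k (by simpa using h) (by simpa using hf)]
          omega

theorem vtrue_getD_true {V : List Bool} {k : Nat} (h : k < V.length) :
    (V.getD k true = false) ↔ ¬ Vtrue V k := by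
  unfold Vtrue
  rw [List.getD_eq_getElem V true h, List.getD_eq_getElem V false h]
  cases V[k] <;> simp

-- membership in one slot after `lst[x].append(v)`
theorem pyAppendAt_char (N : Nat) (g : List (List Int)) (hlen : g.length = N)
    (x v : Int) (k : Nat) (hk : PySem.List.pyIdx? N x = some k) :
    (pyAppendAt g x v).length = N ∧
    ∀ s t, (t ∈ (pyAppendAt g x v).getD s [] ↔ (t ∈ g.getD s [] ∨ (s = k ∧ t = v))) := by
  have hkN : k < N := pyIdx_lt _ _ _ hk
  have hset : pyAppendAt g x v = g.set k (g.getD k [] ++ [v]) := by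
    rw [pyAppendAt, pyGetD_idx g x k [] (by rw [hlen]; exact hk),
        pySetD_idx g x k _ (by rw [hlen]; exact hk)]
  constructor
  · rw [hset]; simp [hlen]
  · intro s t
    rw [hset]
    by_cases hs : s = k
    · subst hs
      rw [getD_set_self g s _ [] (by omega)]
      simp
    · rw [getD_set_ne g k s _ [] hs]
      simp [hs]

-- what the A-side graph-building fold puts into each slot
theorem adjFold_char (N : Nat) (cut : Int) :
    ∀ (l : List (Int × (Int × Int))) (g : List (List Int)) (P : Nat → Int → Prop),
    g.length = N →
    (∀ q ∈ l, q.1 ≠ cut →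
      (∃ s, PySem.List.pyIdx? N q.2.1 = some s) ∧ (∃ t, PySem.List.pyIdx? N q.2.2 = some t)) →
    (∀ s t, t ∈ g.getD s [] ↔ P s t) →
    (l.foldl
      (fun g jab => if jab.1 ≠ cut then pyAppendAt (pyAppendAt g jab.2.1 jab.2.2) jab.2.2 jab.2.1 else g)
      g).length = N ∧
    ∀ s t, (t ∈ (l.foldl
      (fun g jab => if jab.1 ≠ cut then pyAppendAt (pyAppendAt g jab.2.1 jab.2.2) jab.2.2 jab.2.1 else g)
      g).getD s [] ↔
      (P s t ∨ ∃ q ∈ l, q.1 ≠ cut ∧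
        ((PySem.List.pyIdx? N q.2.1 = some s ∧ q.2.2 = t) ∨
         (PySem.List.pyIdx? N q.2.2 = some s ∧ q.2.1 = t)))) := by
  intro l
  induction l with
  | nil =>
      intro g P hlen _ hchar
      refine ⟨hlen, fun s t => ?_⟩
      rw [List.foldl_nil, hchar]
      simp
  | cons q l ih =>
      intro g P hlen hv hchar
      simp only [List.foldl_cons]
      by_cases hq : q.1 ≠ cut
      · obtain ⟨⟨sa, ha⟩, ⟨sb, hb⟩⟩ := hv q (by simp) hq
        obtain ⟨hlen1, hchar1⟩ := pyAppendAt_char N g hlen q.2.1 q.2.2 sa ha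
        obtain ⟨hlen2, hchar2⟩ := pyAppendAt_char N _ hlen1 q.2.2 q.2.1 sb hb
        rw [if_pos hq]
        obtain ⟨hlen3, hchar3⟩ := ih (pyAppendAt (pyAppendAt g q.2.1 q.2.2) q.2.2 q.2.1)
          (fun s t => P s t ∨ (s = sa ∧ t = q.2.2) ∨ (s = sb ∧ t = q.2.1))
          hlen2 (fun r hr => hv r (by simp [hr]))
          (fun s t => by simp only [hchar2, hchar1, hchar]; tauto)
        refine ⟨hlen3, fun s t => ?_⟩
        rw [hchar3]
        simp only [List.mem_cons]
        constructor
        · rintro (((hP | ⟨rfl, rfl⟩ | ⟨rfl, rfl⟩) | ⟨r, hr, hrc, hrd⟩))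
          · exact Or.inl hP
          · exact Or.inr ⟨q, Or.inl rfl, hq, Or.inl ⟨ha, rfl⟩⟩
          · exact Or.inr ⟨q, Or.inl rfl, hq, Or.inr ⟨hb, rfl⟩⟩
          · exact Or.inr ⟨r, Or.inr hr, hrc, hrd⟩
        · rintro (hP | ⟨r, (rfl | hr), hrc, hrd⟩)
          · exact Or.inl (Or.inl hP)
          · rcases hrd with ⟨hs, rfl⟩ | ⟨hs, rfl⟩
            · rw [ha] at hs; exact Or.inl (Or.inr (Or.inl ⟨(Option.some.injEq _ _ ▸ hs).symm ▸ rfl, rfl⟩))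
            · rw [hb] at hs; exact Or.inl (Or.inr (Or.inr ⟨(Option.some.injEq _ _ ▸ hs).symm ▸ rfl, rfl⟩))
          · exact Or.inr ⟨r, hr, hrc, hrd⟩
      · rw [if_neg hq]
        obtain ⟨hlen3, hchar3⟩ := ih g P hlen (fun r hr => hv r (by simp [hr])) hchar
        refine ⟨hlen3, fun s t => ?_⟩
        rw [hchar3]
        simp only [List.mem_cons]
        constructor
        · rintro (hP | ⟨r, hr, hrc, hrd⟩)
          · exact Or.inl hP
          · exact Or.inr ⟨r, Or.inr hr, hrc, hrd⟩
        · rintro (hP | ⟨r, (rfl | hr), hrc, hrd⟩)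
          · exact Or.inl hP
          · exact absurd hrc hq
          · exact Or.inr ⟨r, hr, hrc, hrd⟩

-- one dequeued node's neighbour scan, tracked against reachability
theorem stepA_fold (N : Nat) (cut : Int) (wires : List (Int × Int)) (s0 : Nat)
    (hRs : ReachN N cut wires s0) :
    ∀ (L : List Int) (V : List Bool) (Q : List Int) (c : Int),
    V.length = N →
    c = (V.count true : Int) →
    (∀ q ∈ Q, ∃ k, PySem.List.pyIdx? N q = some k ∧ Vtrue V k) →
    (∀ k, Vtrue V k → ReachN N cut wires k) →
    (∀ t ∈ L, ∃ kt, PySem.List.pyIdx? N t = some kt ∧ EdgeE N cut wires s0 kt) →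
    (L.foldl stepA (V, Q, c)).1.length = N ∧
    (L.foldl stepA (V, Q, c)).2.2 = ((L.foldl stepA (V, Q, c)).1.count true : Int) ∧
    (∀ q ∈ (L.foldl stepA (V, Q, c)).2.1, ∃ k, PySem.List.pyIdx? N q = some k ∧ Vtrue (L.foldl stepA (V, Q, c)).1 k) ∧
    (∀ k, Vtrue (L.foldl stepA (V, Q, c)).1 k → ReachN N cut wires k) ∧
    (∀ k, Vtrue V k → Vtrue (L.foldl stepA (V, Q, c)).1 k) ∧
    (∀ t ∈ L, ∃ kt, PySem.List.pyIdx? N t = some kt ∧ Vtrue (L.foldl stepA (V, Q, c)).1 kt) ∧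
    (∀ k, Vtrue (L.foldl stepA (V, Q, c)).1 k → Vtrue V k ∨ ∃ q ∈ (L.foldl stepA (V, Q, c)).2.1, PySem.List.pyIdx? N q = some k) ∧
    (∀ q ∈ Q, q ∈ (L.foldl stepA (V, Q, c)).2.1) ∧
    ((L.foldl stepA (V, Q, c)).2.1.length + (N - (L.foldl stepA (V, Q, c)).1.count true) = Q.length + (N - V.count true)) := by
  intro L
  induction L with
  | nil =>
      intro V Q c hlen hc hQ hV _
      refine ⟨hlen, by simpa using hc, hQ, hV, fun k h => h, by simp, fun k h => Or.inl h, fun q h => h, rfl⟩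
  | cons t L ih =>
      intro V Q c hlen hc hQ hV hL
      obtain ⟨kt, hkt, hedge⟩ := hL t (by simp)
      have hktN : kt < N := pyIdx_lt _ _ _ hkt
      have hgetd : PySem.List.pyGetD V t true = V.getD kt true :=
        pyGetD_idx V t kt true (by rw [hlen]; exact hkt)
      simp only [List.foldl_cons]
      by_cases hvis : PySem.List.pyGetD V t true = false
      · -- unvisited: mark, enqueue, count up
        have hVkt : ¬ Vtrue V kt := (vtrue_getD_true (by omega)).mp (by rw [← hgetd]; exact hvis)
        have hset : PySem.List.pySetD V t true = V.set kt true :=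
          pySetD_idx V t kt true (by rw [hlen]; exact hkt)
        have hstep : stepA (V, Q, c) t = (V.set kt true, Q ++ [t], c + 1) := by
          simp [stepA, hvis, hset]
        rw [hstep]
        have hlen' : (V.set kt true).length = N := by simp [hlen]
        have hcount' : (V.set kt true).count true = V.count true + 1 :=
          count_set_true V kt (by omega) (by
            unfold Vtrue at hVkt; cases h : V.getD kt false
            · rfl
            · exact absurd h hVkt)
        have hmono : ∀ k, Vtrue V k → Vtrue (V.set kt true) k := by
          intro k h
          by_cases hk : k = kt
          · subst hk; unfold Vtrue; rw [getD_set_self _ _ _ _ (by omega)]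
          · unfold Vtrue at h ⊢; rw [getD_set_ne _ _ _ _ _ hk]; exact h
        have hnewtrue : ∀ k, Vtrue (V.set kt true) k → Vtrue V k ∨ k = kt := by
          intro k h
          by_cases hk : k = kt
          · exact Or.inr hk
          · unfold Vtrue at h; rw [getD_set_ne _ _ _ _ _ hk] at h; exact Or.inl h
        have hktT : Vtrue (V.set kt true) kt := by
          unfold Vtrue; rw [getD_set_self _ _ _ _ (by omega)]
        obtain ⟨c1, c2, c3, c4, c5, c6, c7, c8, c9⟩ := ih (V.set kt true) (Q ++ [t]) (c + 1)
          hlen' (by rw [hcount']; omega)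
          (by
            intro q hq
            rcases List.mem_append.mp hq with hq | hq
            · obtain ⟨k, hk, hVk⟩ := hQ q hq
              exact ⟨k, hk, hmono k hVk⟩
            · simp at hq; subst hq; exact ⟨kt, hkt, hktT⟩)
          (by
            intro k h
            rcases hnewtrue k h with h | rfl
            · exact hV k h
            · exact Relation.ReflTransGen.tail hRs hedge)
          (fun r hr => hL r (by simp [hr]))
        refine ⟨c1, c2, c3, c4, fun k h => c5 k (hmono k h), ?_, ?_, ?_, ?_⟩
        · intro r hr
          rcases List.mem_cons.mp hr with rfl | hr
          · exact ⟨kt, hkt, c5 kt hktT⟩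
          · exact c6 r hr
        · intro k h
          rcases c7 k h with h | h
          · rcases hnewtrue k h with h | rfl
            · exact Or.inl h
            · exact Or.inr ⟨t, c8 t (by simp), hkt⟩
          · exact Or.inr h
        · exact fun q hq => c8 q (by simp [hq])
        · rw [c9]
          simp only [List.length_append, List.length_singleton]
          have h1 : (V.set kt true).count true ≤ N := by
            rw [← hlen']; exact List.count_le_length
          omega
      · -- already visited: state unchanged
        have hVkt : Vtrue V kt := by
          have htrue : V.getD kt true = true := by
            cases h : V.getD kt true
            · exact absurd (hgetd.trans h) hvis
            · rfl
          unfold Vtrue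
          rw [List.getD_eq_getElem V false (by omega)]
          rw [List.getD_eq_getElem V true (by omega)] at htrue
          exact htrue
        have hstep : stepA (V, Q, c) t = (V, Q, c) := by simp [stepA, hvis]
        rw [hstep]
        obtain ⟨c1, c2, c3, c4, c5, c6, c7, c8, c9⟩ := ih V Q c hlen hc hQ hV
          (fun r hr => hL r (by simp [hr]))
        refine ⟨c1, c2, c3, c4, c5, ?_, c7, c8, c9⟩
        intro r hr
        rcases List.mem_cons.mp hr with rfl | hr
        · exact ⟨kt, hkt, c5 kt hVkt⟩
        · exact c6 r hr

-- A's BFS computes exactly the indicator of ReachN (given the two graph-membership facts)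
theorem bfsA_main (N : Nat) (cut : Int) (wires : List (Int × Int)) (g : List (List Int))
    (hg : g.length = N)
    (hLE : ∀ s t, t ∈ g.getD s [] → ∃ kt, PySem.List.pyIdx? N t = some kt ∧ EdgeE N cut wires s kt)
    (hEB : ∀ s t, EdgeE N cut wires s t → ∃ b, b ∈ g.getD s [] ∧ PySem.List.pyIdx? N b = some t) :
    ∀ (fuel : Nat) (V : List Bool) (Q : List Int) (c : Int),
    V.length = N →
    c = (V.count true : Int) →
    (∀ q ∈ Q, ∃ k, PySem.List.pyIdx? N q = some k ∧ Vtrue V k) →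
    (∀ k, Vtrue V k → ReachN N cut wires k) →
    Vtrue V 1 →
    (∀ s t, Vtrue V s → (∀ q ∈ Q, PySem.List.pyIdx? N q ≠ some s) → EdgeE N cut wires s t → Vtrue V t) →
    Q.length + (N - V.count true) ≤ fuel →
    ∃ Vf, bfsA fuel g V Q c = (Vf.count true : Int) ∧ Vf.length = N ∧
      (∀ k, Vtrue Vf k ↔ ReachN N cut wires k) := by
  intro fuel
  induction fuel with
  | zero =>
      intro V Q c hlen hc hQ hV h1 hcl hfuel
      have hQnil : Q = [] := List.length_eq_zero_iff.mp (by omega)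
      subst hQnil
      refine ⟨V, by simpa [bfsA] using hc, hlen, fun k => ⟨hV k, closure_sub h1 ?_ k⟩⟩
      exact fun s t hs he => hcl s t hs (by simp) he
  | succ fuel ih =>
      intro V Q c hlen hc hQ hV h1 hcl hfuel
      match Q with
      | [] =>
          refine ⟨V, by simpa [bfsA] using hc, hlen, fun k => ⟨hV k, closure_sub h1 ?_ k⟩⟩
          exact fun s t hs he => hcl s t hs (by simp) he
      | node :: rest =>
          obtain ⟨s0, hs0idx, hs0T⟩ := hQ node (by simp)
          have hRs : ReachN N cut wires s0 := hV s0 hs0T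
          have hLg : PySem.List.pyGetD g node [] = g.getD s0 [] :=
            pyGetD_idx g node s0 [] (by rw [hg]; exact hs0idx)
          obtain ⟨c1, c2, c3, c4, c5, c6, c7, c8, c9⟩ :=
            stepA_fold N cut wires s0 hRs (g.getD s0 []) V rest c hlen hc
              (fun q hq => hQ q (by simp [hq])) hV (fun t ht => hLE s0 t ht)
          show ∃ Vf, bfsA (fuel + 1) g V (node :: rest) c = _ ∧ _
          rw [bfsA, hLg]
          apply ih _ _ _ c1 c2 c3 c4 (c5 1 h1) ?_ (by simp only [List.length_cons] at hfuel; omega)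
          intro s t hs hnoq he
          rcases c7 s hs with hVs | ⟨q, hqQ', hqidx⟩
          · by_cases hss0 : s = s0
            · subst hss0
              obtain ⟨b, hbmem, hbidx⟩ := hEB s t he
              obtain ⟨kt, hkt, hkT⟩ := c6 b hbmem
              rw [hbidx] at hkt
              injection hkt with hkt
              exact hkt ▸ hkT
            · refine c5 t (hcl s t hVs ?_ he)
              intro q hq
              rcases List.mem_cons.mp hq with rfl | hq
              · rw [hs0idx]; intro hco; injection hco with hco; exact hss0 hco.symm
              · exact hnoq q (c8 q hq)
          · exact absurd hqidx (hnoq q hqQ')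

-- one saturation sweep of the wire list, tracked against reachability
theorem satStep_fold (N : Nat) (cut : Int) (wires : List (Int × Int)) :
    ∀ (l : List (Int × (Int × Int))) (R : List Bool) (sz : Int) (ch : Bool),
    R.length = N →
    sz = (R.count true : Int) →
    (∀ k, Vtrue R k → ReachN N cut wires k) →
    (∀ q ∈ l, q ∈ PySem.List.enumerate wires 0) →
    (∀ q ∈ l, q.1 ≠ cut →
      (∃ s, PySem.List.pyIdx? N q.2.1 = some s) ∧ (∃ t, PySem.List.pyIdx? N q.2.2 = some t)) →
    (l.foldl (stepSat cut) (R, sz, ch)).1.length = N ∧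
    (l.foldl (stepSat cut) (R, sz, ch)).2.1 = ((l.foldl (stepSat cut) (R, sz, ch)).1.count true : Int) ∧
    (∀ k, Vtrue R k → Vtrue (l.foldl (stepSat cut) (R, sz, ch)).1 k) ∧
    (∀ k, Vtrue (l.foldl (stepSat cut) (R, sz, ch)).1 k → ReachN N cut wires k) ∧
    R.count true ≤ (l.foldl (stepSat cut) (R, sz, ch)).1.count true ∧
    (ch = true → (l.foldl (stepSat cut) (R, sz, ch)).2.2 = true) ∧
    ((l.foldl (stepSat cut) (R, sz, ch)).2.2 = false →
      (l.foldl (stepSat cut) (R, sz, ch)).1 = R ∧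
      (∀ q ∈ l, q.1 ≠ cut → ∀ s t, PySem.List.pyIdx? N q.2.1 = some s →
        PySem.List.pyIdx? N q.2.2 = some t → (Vtrue R s ↔ Vtrue R t))) ∧
    ((l.foldl (stepSat cut) (R, sz, ch)).2.2 = true →
      ch = true ∨ R.count true + 1 ≤ (l.foldl (stepSat cut) (R, sz, ch)).1.count true) := by
  intro l
  induction l with
  | nil =>
      intro R sz ch hlen hsz hsound _ _
      exact ⟨hlen, by simpa using hsz, fun k h => h, hsound, le_refl _, fun h => h,
        fun _ => ⟨rfl, by simp⟩, fun h => Or.inl (by simpa using h)⟩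
  | cons q l ih =>
      intro R sz ch hlen hsz hsound hsub hv
      simp only [List.foldl_cons]
      by_cases hq : q.1 ≠ cut
      · obtain ⟨⟨sa, ha⟩, ⟨sb, hb⟩⟩ := hv q (by simp) hq
        have hsaN : sa < N := pyIdx_lt _ _ _ ha
        have hsbN : sb < N := pyIdx_lt _ _ _ hb
        have hga : PySem.List.pyGetD R q.2.1 false = R.getD sa false :=
          pyGetD_idx R q.2.1 sa false (by rw [hlen]; exact ha)
        have hgb : PySem.List.pyGetD R q.2.2 false = R.getD sb false :=
          pyGetD_idx R q.2.2 sb false (by rw [hlen]; exact hb)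
        have hedge : EdgeE N cut wires sa sb :=
          ⟨q, hsub q (by simp), hq, Or.inl ⟨ha, hb⟩⟩
        by_cases hf1 : PySem.List.pyGetD R q.2.1 false = true ∧ PySem.List.pyGetD R q.2.2 false = false
        · -- fire: mark q.2.2
          have hstep : stepSat cut (R, sz, ch) q = (R.set sb true, sz + 1, true) := by
            simp only [stepSat, if_pos hq, if_pos hf1]
            rw [pySetD_idx R q.2.2 sb true (by rw [hlen]; exact hb)]
          rw [hstep]
          have hcount' : (R.set sb true).count true = R.count true + 1 :=
            count_set_true R sb (by omega) (hgb.symm.trans hf1.2)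
          have hmono : ∀ k, Vtrue R k → Vtrue (R.set sb true) k := by
            intro k h
            by_cases hk : k = sb
            · subst hk; unfold Vtrue; rw [getD_set_self _ _ _ _ (by omega)]
            · unfold Vtrue at h ⊢; rw [getD_set_ne _ _ _ _ _ hk]; exact h
          obtain ⟨c1, c2, c3, c4, c5, c6, c7, c8⟩ := ih (R.set sb true) (sz + 1) true
            (by simp [hlen]) (by rw [hcount']; omega)
            (by
              intro k h
              by_cases hk : k = sb
              · subst hk
                exact Relation.ReflTransGen.tail (hsound sa (hga.symm.trans hf1.1)) hedge
              · unfold Vtrue at h; rw [getD_set_ne _ _ _ _ _ hk] at h; exact hsound k h)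
            (fun r hr => hsub r (by simp [hr])) (fun r hr => hv r (by simp [hr]))
          refine ⟨c1, c2, fun k h => c3 k (hmono k h), c4, ?_, fun _ => c6 rfl, ?_, ?_⟩
          · omega
          · intro hfalse
            rw [c6 rfl] at hfalse; exact absurd hfalse (by simp)
          · intro _; right; omega
        · by_cases hf2 : PySem.List.pyGetD R q.2.2 false = true ∧ PySem.List.pyGetD R q.2.1 false = false
          · -- fire: mark q.2.1
            have hstep : stepSat cut (R, sz, ch) q = (R.set sa true, sz + 1, true) := by
              simp only [stepSat, if_pos hq, if_neg hf1, if_pos hf2]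
              rw [pySetD_idx R q.2.1 sa true (by rw [hlen]; exact ha)]
            rw [hstep]
            have hcount' : (R.set sa true).count true = R.count true + 1 :=
              count_set_true R sa (by omega) (hga.symm.trans hf2.2)
            have hmono : ∀ k, Vtrue R k → Vtrue (R.set sa true) k := by
              intro k h
              by_cases hk : k = sa
              · subst hk; unfold Vtrue; rw [getD_set_self _ _ _ _ (by omega)]
              · unfold Vtrue at h ⊢; rw [getD_set_ne _ _ _ _ _ hk]; exact h
            obtain ⟨c1, c2, c3, c4, c5, c6, c7, c8⟩ := ih (R.set sa true) (sz + 1) true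
              (by simp [hlen]) (by rw [hcount']; omega)
              (by
                intro k h
                by_cases hk : k = sa
                · subst hk
                  exact Relation.ReflTransGen.tail (hsound sb (hgb.symm.trans hf2.1)) (EdgeE_symm hedge)
                · unfold Vtrue at h; rw [getD_set_ne _ _ _ _ _ hk] at h; exact hsound k h)
              (fun r hr => hsub r (by simp [hr])) (fun r hr => hv r (by simp [hr]))
            refine ⟨c1, c2, fun k h => c3 k (hmono k h), c4, ?_, fun _ => c6 rfl, ?_, ?_⟩
            · omega
            · intro hfalse
              rw [c6 rfl] at hfalse; exact absurd hfalse (by simp)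
            · intro _; right; omega
          · -- no fire: state unchanged, and this edge is already balanced
            have hstep : stepSat cut (R, sz, ch) q = (R, sz, ch) := by
              simp only [stepSat, if_pos hq, if_neg hf1, if_neg hf2]
            rw [hstep]
            obtain ⟨c1, c2, c3, c4, c5, c6, c7, c8⟩ := ih R sz ch hlen hsz hsound
              (fun r hr => hsub r (by simp [hr])) (fun r hr => hv r (by simp [hr]))
            refine ⟨c1, c2, c3, c4, c5, c6, ?_, c8⟩
            intro hfalse
            obtain ⟨hfix, hclosed⟩ := c7 hfalse
            refine ⟨hfix, ?_⟩
            intro r hr hrc s t hs ht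
            rcases List.mem_cons.mp hr with rfl | hr
            · -- this is q itself: determinism of pyIdx? pins s, t
              rw [ha] at hs; injection hs with hs
              rw [hb] at ht; injection ht with ht
              subst hs; subst ht
              unfold Vtrue
              rw [← hga, ← hgb]
              cases hA : PySem.List.pyGetD R r.2.1 false <;> cases hB : PySem.List.pyGetD R r.2.2 false
              · simp
              · exact absurd ⟨hB, hA⟩ hf2
              · exact absurd ⟨hA, hB⟩ hf1
              · simp
            · exact hclosed r hr hrc s t hs ht
      · have hstep : stepSat cut (R, sz, ch) q = (R, sz, ch) := by
          simp only [stepSat, if_neg hq]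
        rw [hstep]
        obtain ⟨c1, c2, c3, c4, c5, c6, c7, c8⟩ := ih R sz ch hlen hsz hsound
          (fun r hr => hsub r (by simp [hr])) (fun r hr => hv r (by simp [hr]))
        refine ⟨c1, c2, c3, c4, c5, c6, ?_, c8⟩
        intro hfalse
        obtain ⟨hfix, hclosed⟩ := c7 hfalse
        refine ⟨hfix, ?_⟩
        intro r hr hrc s t hs ht
        rcases List.mem_cons.mp hr with rfl | hr
        · exact absurd hrc hq
        · exact hclosed r hr hrc s t hs ht

-- B's saturation loop computes exactly the indicator of ReachN
theorem loopB_main (N : Nat) (cut : Int) (wires : List (Int × Int))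
    (hv : ∀ q ∈ PySem.List.enumerate wires 0, q.1 ≠ cut →
      (∃ s, PySem.List.pyIdx? N q.2.1 = some s) ∧ (∃ t, PySem.List.pyIdx? N q.2.2 = some t)) :
    ∀ (fuel : Nat) (R : List Bool) (sz : Int),
    R.length = N →
    sz = (R.count true : Int) →
    (∀ k, Vtrue R k → ReachN N cut wires k) →
    Vtrue R 1 →
    N + 1 ≤ fuel + R.count true →
    ∃ Rf, loopB fuel cut wires R sz = (Rf.count true : Int) ∧ Rf.length = N ∧
      (∀ k, Vtrue Rf k ↔ ReachN N cut wires k) := by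
  intro fuel
  induction fuel with
  | zero =>
      intro R sz hlen hsz hsound h1 hfuel
      have := List.count_le_length (a := true) (l := R)
      omega
  | succ fuel ih =>
      intro R sz hlen hsz hsound h1 hfuel
      obtain ⟨c1, c2, c3, c4, c5, _, c7, c8⟩ :=
        satStep_fold N cut wires (PySem.List.enumerate wires 0) R sz false
          hlen hsz hsound (fun q hq => hq) hv
      have hunfold : loopB (fuel + 1) cut wires R sz =
        (if ((PySem.List.enumerate wires 0).foldl (stepSat cut) (R, sz, false)).2.2 = true then
          loopB fuel cut wires ((PySem.List.enumerate wires 0).foldl (stepSat cut) (R, sz, false)).1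
            ((PySem.List.enumerate wires 0).foldl (stepSat cut) (R, sz, false)).2.1
        else ((PySem.List.enumerate wires 0).foldl (stepSat cut) (R, sz, false)).2.1) := rfl
      rw [hunfold]
      by_cases hch : ((PySem.List.enumerate wires 0).foldl (stepSat cut) (R, sz, false)).2.2 = true
      · rw [if_pos hch]
        have hstrict : R.count true + 1 ≤
            ((PySem.List.enumerate wires 0).foldl (stepSat cut) (R, sz, false)).1.count true := by
          rcases c8 hch with h | h
          · exact absurd h (by simp)
          · exact h
        exact ih _ _ c1 c2 c4 (c3 1 h1) (by omega)
      · rw [if_neg hch]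
        obtain ⟨hfix, hclosed⟩ := c7 (by simpa using hch)
        refine ⟨R, ?_, hlen, fun k => ⟨hsound k, closure_sub h1 ?_ k⟩⟩
        · rw [c2, hfix]
        · rintro s t hs ⟨q, hq, hqc, hd | hd⟩
          · exact (hclosed q hq hqc s t hd.1 hd.2).mp hs
          · exact (hclosed q hq hqc t s hd.2 hd.1).mpr hs

theorem solution_eq (n : Int) (wires : List (Int × Int)) (hpre : Pre_solution n wires) :
    solution n wires = solution_alt n wires := by
  by_cases hnil : wires = []
  · subst hnil
    simp [solution, solution_alt, PySem.List.pyRange_one_eq_nil]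
  · have hn : 1 ≤ n := hpre.1 hnil
    set N := (n + 1).toNat with hNdef
    have hN : (N : Int) = n + 1 := Int.toNat_of_nonneg (by omega)
    have hN2 : 2 ≤ N := by omega
    unfold solution solution_alt
    apply PySem.List.foldl_congr_mem
    intro acc cut hcut
    dsimp only
    -- every surviving wire endpoint has a valid slot
    have hv : ∀ q ∈ PySem.List.enumerate wires 0, q.1 ≠ cut →
        (∃ s, PySem.List.pyIdx? N q.2.1 = some s) ∧ (∃ t, PySem.List.pyIdx? N q.2.2 = some t) := by
      intro q hq hqc
      obtain ⟨k, hk, rfl⟩ := (PySem.List.mem_enumerate_iff _ _ _).mp hq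
      by_cases hm : 2 ≤ wires.length
      · obtain ⟨b1, b2, b3, b4⟩ := hpre.2 hm wires[k] (List.getElem_mem hk)
        exact ⟨pyIdx_of_range N wires[k].1 (by omega) (by omega),
               pyIdx_of_range N wires[k].2 (by omega) (by omega)⟩
      · exfalso
        have hlen1 : wires.length = 1 := by
          have : wires.length ≠ 0 := fun h => hnil (List.length_eq_zero_iff.mp h)
          omega
        have hcut' := (PySem.List.mem_pyRange_one).mp hcut
        simp only [PySem.List.len_eq, hlen1] at hcut'
        apply hqc
        simp only []
        omega
    -- characterize A's rebuilt graph
    have hrep : ∀ s : Nat, (List.replicate N ([] : List Int)).getD s [] = [] := by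
      intro s
      rw [List.getD_eq_getElem?_getD, List.getElem?_replicate]
      split <;> rfl
    obtain ⟨hglen, hgchar⟩ := adjFold_char N cut (PySem.List.enumerate wires 0)
      (List.replicate N []) (fun _ _ => False) (by simp) hv (fun s t => by rw [hrep]; simp)
    have hbg : buildGraphA n wires cut =
        (PySem.List.enumerate wires 0).foldl
          (fun g jab => if jab.1 ≠ cut then pyAppendAt (pyAppendAt g jab.2.1 jab.2.2) jab.2.2 jab.2.1 else g)
          (List.replicate N []) := rfl
    rw [← hbg] at hglen hgchar
    have hLE : ∀ s t, t ∈ (buildGraphA n wires cut).getD s [] →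
        ∃ kt, PySem.List.pyIdx? N t = some kt ∧ EdgeE N cut wires s kt := by
      intro s t ht
      rw [hgchar] at ht
      rcases ht with h | ⟨q, hq, hqc, hd⟩
      · exact absurd h not_false
      obtain ⟨⟨sa, ha⟩, ⟨sb, hb⟩⟩ := hv q hq hqc
      rcases hd with ⟨hs, rfl⟩ | ⟨hs, rfl⟩
      · exact ⟨sb, hb, ⟨q, hq, hqc, Or.inl ⟨hs, hb⟩⟩⟩
      · exact ⟨sa, ha, ⟨q, hq, hqc, Or.inr ⟨hs, ha⟩⟩⟩
    have hEB : ∀ s t, EdgeE N cut wires s t →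
        ∃ b, b ∈ (buildGraphA n wires cut).getD s [] ∧ PySem.List.pyIdx? N b = some t := by
      rintro s t ⟨q, hq, hqc, ⟨hs, ht⟩ | ⟨hs, ht⟩⟩
      · exact ⟨q.2.2, (hgchar s q.2.2).mpr (Or.inr ⟨q, hq, hqc, Or.inl ⟨hs, rfl⟩⟩), ht⟩
      · exact ⟨q.2.1, (hgchar s q.2.1).mpr (Or.inr ⟨q, hq, hqc, Or.inr ⟨hs, rfl⟩⟩), ht⟩
    -- the initial node array
    have hidx1 : PySem.List.pyIdx? N 1 = some 1 := by
      unfold PySem.List.pyIdx?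
      rw [if_pos (by omega : (0:Int) ≤ 1), if_pos (by omega : (1:Int) < (N : Int))]
      rfl
    have hrepb : ∀ s : Nat, (List.replicate N false).getD s false = false := by
      intro s
      rw [List.getD_eq_getElem?_getD, List.getElem?_replicate]
      split <;> rfl
    have hV0 : PySem.List.pySetD (List.replicate N false) 1 true = (List.replicate N false).set 1 true :=
      pySetD_idx _ _ _ _ (by simpa using hidx1)
    have hV0len : ((List.replicate N false).set 1 true).length = N := by simp
    have hV0count : ((List.replicate N false).set 1 true).count true = 1 := by
      rw [count_set_true _ _ (by simp; omega) (hrepb 1)]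
      simp [List.count_replicate]
    have hV0true : Vtrue ((List.replicate N false).set 1 true) 1 := by
      unfold Vtrue
      rw [getD_set_self _ _ _ _ (by simp; omega)]
    have hV0only : ∀ k, Vtrue ((List.replicate N false).set 1 true) k → k = 1 := by
      intro k h
      by_cases hk : k = 1
      · exact hk
      · unfold Vtrue at h
        rw [getD_set_ne _ _ _ _ _ hk, hrepb] at h
        exact absurd h (by simp)
    -- run both characterizations
    obtain ⟨Vf, hVf1, hVf2, hVf3⟩ := bfsA_main N cut wires (buildGraphA n wires cut) hglen hLE hEB
      (n + 3).toNat ((List.replicate N false).set 1 true) [1] 1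
      hV0len (by rw [hV0count]; simp)
      (fun q hq => by rw [List.mem_singleton] at hq; subst hq; exact ⟨1, hidx1, hV0true⟩)
      (fun k h => (hV0only k h) ▸ Relation.ReflTransGen.refl)
      hV0true
      (by
        intro s t hs hnoq he
        have hs1 : s = 1 := hV0only s hs
        subst hs1
        exact absurd hidx1 (hnoq 1 (by simp)))
      (by rw [hV0count]; simp only [List.length_singleton]; omega)
    obtain ⟨Rf, hRf1, hRf2, hRf3⟩ := loopB_main N cut wires hv
      (n + 3).toNat ((List.replicate N false).set 1 true) 1
      hV0len (by rw [hV0count]; simp)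
      (fun k h => (hV0only k h) ▸ Relation.ReflTransGen.refl)
      hV0true
      (by rw [hV0count]; omega)
    -- the two final arrays coincide
    have hVfRf : Vf = Rf := by
      apply List.ext_getElem (hVf2.trans hRf2.symm)
      intro i h1 h2
      have hiff : (Vf.getD i false = true) ↔ (Rf.getD i false = true) := (hVf3 i).trans (hRf3 i).symm
      rw [List.getD_eq_getElem _ _ h1, List.getD_eq_getElem _ _ h2] at hiff
      cases hA : Vf[i] <;> cases hB : Rf[i] <;> simp_all
    rw [hV0, hVf1, hRf1, hVfRf]
    have harith : (Rf.count true : Int) - (n - (Rf.count true : Int)) = 2 * (Rf.count true : Int) - n := by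
      ring
    rw [harith]


-- ===== VERDICT (by name: the statement is the Claim_ definition above) =====
theorem solution_spec : Claim_equal_solution := by
  intro n wires _ hpre
  unfold Spec_solution
  exact solution_eq n wires hpre
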